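-- pv_equiv track=rewrite | github.com/advokat11/case_1 | script.py | find_sum_between_max_min
-- ===== SOURCE A (Python) =====
-- def find_sum_between_max_min(arr):
--     if len(arr) == 0:
--         return 0  # Если массив пустой
--
--     max_index = arr.index(max(arr))  # Индекс максимального элемента
--     min_index = arr.index(min(arr))  # Индекс минимального элемента
--
--     # Определение границ между max и min
--     start = min(max_index, min_index) + 1
--     end = max(max_index, min_index)
--
--     # Суммирование отрицательных элементов
--     negative_sum = sum(x for x in arr[start:end] if x < 0)
--
--     return negative_sum
-- ===== SOURCE B (Python) =====
-- def find_sum_between_max_min(arr):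
--     # One pass: keep a running prefix-sum of negatives and snapshot it at each
--     # first-occurrence extremum update; the result is a difference of snapshots.
--     s = 0
--     max_v = min_v = None
--     max_i = min_i = 0
--     s_at_max = s_after_max = s_at_min = s_after_min = 0
--     for i, x in enumerate(arr):
--         neg = x if x < 0 else 0
--         if max_v is None or x > max_v:
--             max_v, max_i, s_at_max, s_after_max = x, i, s, s + neg
--         if min_v is None or x < min_v:
--             min_v, min_i, s_at_min, s_after_min = x, i, s, s + neg
--         s += neg
--     if max_v is None:
--         return 0
--     if max_i < min_i:
--         return s_at_min - s_after_max
--     if min_i < max_i: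
--         return s_at_max - s_after_min
--     return 0
-- ===== Notes on version B (the rewrite author's own statement) =====
-- stated objective: alternative
-- what changed: B makes a single pass keeping a running prefix-sum of the negative elements and snapshots that sum (before and after the element) whenever the running max or min is first improved; the result is a difference of two snapshots, so no index lookup, no slice and no second summing pass exist.
import Mathlib
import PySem

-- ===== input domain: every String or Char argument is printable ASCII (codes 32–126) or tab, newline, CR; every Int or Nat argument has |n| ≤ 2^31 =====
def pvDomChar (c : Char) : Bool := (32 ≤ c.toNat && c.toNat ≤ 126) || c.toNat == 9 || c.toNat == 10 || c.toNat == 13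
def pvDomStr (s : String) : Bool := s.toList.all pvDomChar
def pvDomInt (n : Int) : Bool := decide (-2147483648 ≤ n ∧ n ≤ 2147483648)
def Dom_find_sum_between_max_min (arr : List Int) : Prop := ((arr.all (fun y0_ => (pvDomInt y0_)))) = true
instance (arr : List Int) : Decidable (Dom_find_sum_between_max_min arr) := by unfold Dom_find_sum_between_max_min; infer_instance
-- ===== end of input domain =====

-- B replaces A's library scans (max, min, two .index) and its slice-sum by ONE pass that
-- carries a running prefix-sum of the negative elements and snapshots it at every
-- first-occurrence extremum update; the answer is a difference of two snapshots
-- (objective: alternative — same O(n) cost, different algorithm).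

-- ===== PORT A =====
def find_sum_between_max_min (arr : List Int) : Int :=
  if arr.length == 0 then 0
  else
    match PySem.List.max? arr (fun y => y), PySem.List.min? arr (fun y => y) with
    | some mx, some mn =>
      match PySem.List.index? arr mx, PySem.List.index? arr mn with
      | some maxIdx, some minIdx =>
        let start : Nat := min maxIdx minIdx + 1
        let stop : Nat := max maxIdx minIdx
        (PySem.List.slice arr (some (start : Int)) (some (stop : Int))).foldl
          (fun acc x => if x < 0 then acc + x else acc) 0
      | _, _ => 0
    | _, _ => 0

-- ===== PORT B =====
-- x if x < 0 else 0
def negp (x : Int) : Int := if x < 0 then x else 0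

-- B's loop body: state = (max record?, min record?, running negative prefix-sum, position);
-- a record is (value, index, snapshot of the sum before the element, snapshot after it)
def altStep (st : Option (Int × Nat × Int × Int) × Option (Int × Nat × Int × Int) × Int × Nat)
    (x : Int) : Option (Int × Nat × Int × Int) × Option (Int × Nat × Int × Int) × Int × Nat :=
  match st with
  | (mo, no, s, i) =>
    let mo' := match mo with
      | none => some (x, i, s, s + negp x)
      | some (v, j, p, q) => if v < x then some (x, i, s, s + negp x) else some (v, j, p, q)
    let no' := match no with
      | none => some (x, i, s, s + negp x)
      | some (w, k, p, q) => if x < w then some (x, i, s, s + negp x) else some (w, k, p, q)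
    (mo', no', s + negp x, i + 1)

def find_sum_between_max_min_alt (arr : List Int) : Int :=
  let r := arr.foldl altStep (none, none, 0, 0)
  match r.1 with
  | none => 0          -- "if max_v is None: return 0" (empty input)
  | some (_, mxi, pAt, pAfter) =>
    match r.2.1 with
    | none => 0        -- unreachable: both records are set together
    | some (_, mni, qAt, qAfter) =>
      if mxi < mni then qAt - pAfter
      else if mni < mxi then pAt - qAfter
      else 0

-- ===== PRECONDITION & SPEC =====
def Spec_find_sum_between_max_min (arr : List Int) (out : Int) : Prop := out = find_sum_between_max_min_alt arr
instance (arr : List Int) (out : Int) : Decidable (Spec_find_sum_between_max_min arr out) := by unfold Spec_find_sum_between_max_min; infer_instance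

-- ===== CLAIM (what is proved, stated in full; the proofs are below) =====
def Claim_equal_find_sum_between_max_min : Prop := ∀ (arr : List Int), Dom_find_sum_between_max_min arr → Spec_find_sum_between_max_min arr (find_sum_between_max_min arr)

-- ===== LEMMAS AND PROOFS =====

-- sum of the negative elements of a list
def N (l : List Int) : Int := (l.filter (fun x => decide (x < 0))).sum

theorem N_cons (x : Int) (t : List Int) : N (x :: t) = negp x + N t := by
  by_cases h : x < 0 <;> simp [N, negp, h]

theorem N_append (u v : List Int) : N (u ++ v) = N u + N v := by
  simp [N, List.filter_append]

-- when the head strictly improves the running max, the recorded index is the head's position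
theorem idx_max_cons (x : Int) (t : List Int) (v : Int) (i j : Nat) (hvx : v < x) :
    (if x < t.foldl max x then i + 1 + List.idxOf (t.foldl max x) t else i) =
      if v < (x :: t).foldl max v then i + List.idxOf ((x :: t).foldl max v) (x :: t) else j := by
  have hxle : x ≤ t.foldl max x := (PySem.List.le_foldl_max t x).1
  have hfe : (x :: t).foldl max v = t.foldl max x := by
    simp [max_eq_right (le_of_lt hvx)]
  rw [hfe]
  by_cases hlt : x < t.foldl max x
  · have hne : (x == t.foldl max x) = false := by
      simp [ne_of_lt hlt]
    rw [if_pos hlt, if_pos (lt_trans hvx hlt), List.idxOf_cons, hne]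
    simp [Nat.add_comm, Nat.add_left_comm]
  · have hx : t.foldl max x = x := le_antisymm (le_of_not_gt hlt) hxle
    rw [if_neg hlt, hx, if_pos hvx, List.idxOf_cons]
    simp

-- when the head does not improve the running max, the head is skipped
theorem idx_max_cons' (x : Int) (t : List Int) (v : Int) (j i : Nat) (hvx : ¬ v < x) :
    (if v < t.foldl max v then i + 1 + List.idxOf (t.foldl max v) t else j) =
      if v < (x :: t).foldl max v then i + List.idxOf ((x :: t).foldl max v) (x :: t) else j := by
  have hfe : (x :: t).foldl max v = t.foldl max v := by
    simp [max_eq_left (le_of_not_gt hvx)]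
  rw [hfe]
  by_cases hlt : v < t.foldl max v
  · have hne : (x == t.foldl max v) = false := by
      simp; omega
    rw [if_pos hlt, if_pos hlt, List.idxOf_cons, hne]
    simp [Nat.add_comm, Nat.add_left_comm]
  · rw [if_neg hlt, if_neg hlt]

-- min-side twins
theorem idx_min_cons (x : Int) (t : List Int) (w : Int) (i k : Nat) (hxw : x < w) :
    (if t.foldl min x < x then i + 1 + List.idxOf (t.foldl min x) t else i) =
      if (x :: t).foldl min w < w then i + List.idxOf ((x :: t).foldl min w) (x :: t) else k := by
  have hxle : t.foldl min x ≤ x := (PySem.List.foldl_min_le t x).1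
  have hfe : (x :: t).foldl min w = t.foldl min x := by
    simp [min_eq_right (le_of_lt hxw)]
  rw [hfe]
  by_cases hlt : t.foldl min x < x
  · have hne : (x == t.foldl min x) = false := by
      simp; omega
    rw [if_pos hlt, if_pos (lt_trans hlt hxw), List.idxOf_cons, hne]
    simp [Nat.add_comm, Nat.add_left_comm]
  · have hx : t.foldl min x = x := le_antisymm hxle (le_of_not_gt hlt)
    rw [if_neg hlt, hx, if_pos hxw, List.idxOf_cons]
    simp

theorem idx_min_cons' (x : Int) (t : List Int) (w : Int) (k i : Nat) (hxw : ¬ x < w) :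
    (if t.foldl min w < w then i + 1 + List.idxOf (t.foldl min w) t else k) =
      if (x :: t).foldl min w < w then i + List.idxOf ((x :: t).foldl min w) (x :: t) else k := by
  have hfe : (x :: t).foldl min w = t.foldl min w := by
    simp [min_eq_left (le_of_not_gt hxw)]
  rw [hfe]
  by_cases hlt : t.foldl min w < w
  · have hne : (x == t.foldl min w) = false := by
      simp; omega
    rw [if_pos hlt, if_pos hlt, List.idxOf_cons, hne]
    simp [Nat.add_comm, Nat.add_left_comm]
  · rw [if_neg hlt, if_neg hlt]

-- snapshot of the negative prefix-sum at the recorded max index (+ offset d: 0 = before, 1 = after),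
-- head strictly improves the running max
theorem snap_max_improve (x : Int) (t : List Int) (v P E s : Int) (d : Nat) (hvx : v < x)
    (hE : E = s + N ((x :: t).take d)) :
    (if x < t.foldl max x then (s + negp x) + N (t.take (List.idxOf (t.foldl max x) t + d)) else E) =
      if v < (x :: t).foldl max v then s + N ((x :: t).take (List.idxOf ((x :: t).foldl max v) (x :: t) + d)) else P := by
  have hxle : x ≤ t.foldl max x := (PySem.List.le_foldl_max t x).1
  have hfe : (x :: t).foldl max v = t.foldl max x := by
    simp [max_eq_right (le_of_lt hvx)]
  rw [hfe]
  by_cases hlt : x < t.foldl max x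
  · have hne : (x == t.foldl max x) = false := by simp [ne_of_lt hlt]
    rw [if_pos hlt, if_pos (lt_trans hvx hlt), List.idxOf_cons, hne]
    simp only [cond_false]
    rw [show List.idxOf (t.foldl max x) t + 1 + d = (List.idxOf (t.foldl max x) t + d) + 1 by omega,
      List.take_succ_cons, N_cons]
    ring
  · have hx : t.foldl max x = x := le_antisymm (le_of_not_gt hlt) hxle
    rw [if_neg hlt, hx, if_pos hvx, List.idxOf_cons]
    simp [hE]

-- head does not improve the running max
theorem snap_max_keep (x : Int) (t : List Int) (v P s : Int) (d : Nat) (hvx : ¬ v < x) :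
    (if v < t.foldl max v then (s + negp x) + N (t.take (List.idxOf (t.foldl max v) t + d)) else P) =
      if v < (x :: t).foldl max v then s + N ((x :: t).take (List.idxOf ((x :: t).foldl max v) (x :: t) + d)) else P := by
  have hfe : (x :: t).foldl max v = t.foldl max v := by
    simp [max_eq_left (le_of_not_gt hvx)]
  rw [hfe]
  by_cases hlt : v < t.foldl max v
  · have hne : (x == t.foldl max v) = false := by simp; omega
    rw [if_pos hlt, if_pos hlt, List.idxOf_cons, hne]
    simp only [cond_false]
    rw [show List.idxOf (t.foldl max v) t + 1 + d = (List.idxOf (t.foldl max v) t + d) + 1 by omega,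
      List.take_succ_cons, N_cons]
    ring
  · rw [if_neg hlt, if_neg hlt]

-- min-side twins
theorem snap_min_improve (x : Int) (t : List Int) (w P E s : Int) (d : Nat) (hxw : x < w)
    (hE : E = s + N ((x :: t).take d)) :
    (if t.foldl min x < x then (s + negp x) + N (t.take (List.idxOf (t.foldl min x) t + d)) else E) =
      if (x :: t).foldl min w < w then s + N ((x :: t).take (List.idxOf ((x :: t).foldl min w) (x :: t) + d)) else P := by
  have hxle : t.foldl min x ≤ x := (PySem.List.foldl_min_le t x).1
  have hfe : (x :: t).foldl min w = t.foldl min x := by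
    simp [min_eq_right (le_of_lt hxw)]
  rw [hfe]
  by_cases hlt : t.foldl min x < x
  · have hne : (x == t.foldl min x) = false := by simp; omega
    rw [if_pos hlt, if_pos (lt_trans hlt hxw), List.idxOf_cons, hne]
    simp only [cond_false]
    rw [show List.idxOf (t.foldl min x) t + 1 + d = (List.idxOf (t.foldl min x) t + d) + 1 by omega,
      List.take_succ_cons, N_cons]
    ring
  · have hx : t.foldl min x = x := le_antisymm hxle (le_of_not_gt hlt)
    rw [if_neg hlt, hx, if_pos hxw, List.idxOf_cons]
    simp [hE]

theorem snap_min_keep (x : Int) (t : List Int) (w P s : Int) (d : Nat) (hxw : ¬ x < w) :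
    (if t.foldl min w < w then (s + negp x) + N (t.take (List.idxOf (t.foldl min w) t + d)) else P) =
      if (x :: t).foldl min w < w then s + N ((x :: t).take (List.idxOf ((x :: t).foldl min w) (x :: t) + d)) else P := by
  have hfe : (x :: t).foldl min w = t.foldl min w := by
    simp [min_eq_left (le_of_not_gt hxw)]
  rw [hfe]
  by_cases hlt : t.foldl min w < w
  · have hne : (x == t.foldl min w) = false := by simp; omega
    rw [if_pos hlt, if_pos hlt, List.idxOf_cons, hne]
    simp only [cond_false]
    rw [show List.idxOf (t.foldl min w) t + 1 + d = (List.idxOf (t.foldl min w) t + d) + 1 by omega,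
      List.take_succ_cons, N_cons]
    ring
  · rw [if_neg hlt, if_neg hlt]

-- the loop invariant of B's single pass
theorem foldl_altStep (l : List Int) (v w : Int) (j k : Nat) (pA pB qA qB s : Int) (i : Nat) :
    l.foldl altStep (some (v, j, pA, pB), some (w, k, qA, qB), s, i) =
      (some (l.foldl max v,
             (if v < l.foldl max v then i + List.idxOf (l.foldl max v) l else j),
             (if v < l.foldl max v then s + N (l.take (List.idxOf (l.foldl max v) l + 0)) else pA),
             (if v < l.foldl max v then s + N (l.take (List.idxOf (l.foldl max v) l + 1)) else pB)),
       some (l.foldl min w,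
             (if l.foldl min w < w then i + List.idxOf (l.foldl min w) l else k),
             (if l.foldl min w < w then s + N (l.take (List.idxOf (l.foldl min w) l + 0)) else qA),
             (if l.foldl min w < w then s + N (l.take (List.idxOf (l.foldl min w) l + 1)) else qB)),
       s + N l, i + l.length) := by
  induction l generalizing v w j k pA pB qA qB s i with
  | nil => simp [N]
  | cons x t ih =>
    conv_lhs => rw [List.foldl_cons]
    by_cases hvx : v < x <;> by_cases hxw : x < w <;>
      simp only [altStep, hvx, hxw, ite_true, ite_false] <;>
      rw [ih] <;>
      simp only [Prod.mk.injEq, Option.some.injEq] <;>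
      refine ⟨⟨?_, ?_, ?_, ?_⟩, ⟨?_, ?_, ?_, ?_⟩, ?_, ?_⟩
    · simp [max_eq_right (le_of_lt hvx)]
    · exact idx_max_cons x t v i j hvx
    · exact snap_max_improve x t v pA s s 0 hvx (by simp [N])
    · exact snap_max_improve x t v pB (s + negp x) s 1 hvx
        (by by_cases h : x < 0 <;> simp [N, negp, h])
    · simp [min_eq_right (le_of_lt hxw)]
    · exact idx_min_cons x t w i k hxw
    · exact snap_min_improve x t w qA s s 0 hxw (by simp [N])
    · exact snap_min_improve x t w qB (s + negp x) s 1 hxw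
        (by by_cases h : x < 0 <;> simp [N, negp, h])
    · rw [N_cons]; ring
    · simp [Nat.add_comm, Nat.add_left_comm]
    · simp [max_eq_right (le_of_lt hvx)]
    · exact idx_max_cons x t v i j hvx
    · exact snap_max_improve x t v pA s s 0 hvx (by simp [N])
    · exact snap_max_improve x t v pB (s + negp x) s 1 hvx
        (by by_cases h : x < 0 <;> simp [N, negp, h])
    · simp [min_eq_left (le_of_not_gt hxw)]
    · exact idx_min_cons' x t w k i hxw
    · exact snap_min_keep x t w qA s 0 hxw
    · exact snap_min_keep x t w qB s 1 hxw
    · rw [N_cons]; ring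
    · simp [Nat.add_comm, Nat.add_left_comm]
    · simp [max_eq_left (le_of_not_gt hvx)]
    · exact idx_max_cons' x t v j i hvx
    · exact snap_max_keep x t v pA s 0 hvx
    · exact snap_max_keep x t v pB s 1 hvx
    · simp [min_eq_right (le_of_lt hxw)]
    · exact idx_min_cons x t w i k hxw
    · exact snap_min_improve x t w qA s s 0 hxw (by simp [N])
    · exact snap_min_improve x t w qB (s + negp x) s 1 hxw
        (by by_cases h : x < 0 <;> simp [N, negp, h])
    · rw [N_cons]; ring
    · simp [Nat.add_comm, Nat.add_left_comm]
    · simp [max_eq_left (le_of_not_gt hvx)]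
    · exact idx_max_cons' x t v j i hvx
    · exact snap_max_keep x t v pA s 0 hvx
    · exact snap_max_keep x t v pB s 1 hvx
    · simp [min_eq_left (le_of_not_gt hxw)]
    · exact idx_min_cons' x t w k i hxw
    · exact snap_min_keep x t w qA s 0 hxw
    · exact snap_min_keep x t w qB s 1 hxw
    · rw [N_cons]; ring
    · simp [Nat.add_comm, Nat.add_left_comm]

-- first-match index via idxOf? (searched: no Mathlib lemma closes it)
theorem idxOf?_eq_some_of_mem (l : List Int) (v : Int) (h : v ∈ l) :
    List.idxOf? v l = some (List.idxOf v l) := by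
  induction l with
  | nil => simp at h
  | cons x t ih =>
    by_cases hx : x = v
    · subst hx; simp [List.idxOf?_cons]
    · rcases List.mem_cons.mp h with rfl | h
      · exact absurd rfl hx
      · simp [List.idxOf?_cons, hx, ih h]

-- A on a nonempty list: the negative sum over the clamped drop/take window
theorem A_char (a : Int) (t : List Int) :
    find_sum_between_max_min (a :: t) =
      N (((a :: t).drop (min (List.idxOf (t.foldl max a) (a :: t)) (List.idxOf (t.foldl min a) (a :: t)) + 1)).take
          (max (List.idxOf (t.foldl max a) (a :: t)) (List.idxOf (t.foldl min a) (a :: t))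
            - (min (List.idxOf (t.foldl max a) (a :: t)) (List.idxOf (t.foldl min a) (a :: t)) + 1))) := by
  unfold N
  have hMmem : t.foldl max a ∈ a :: t := by
    rcases PySem.List.foldl_max_mem t a with h | h
    · rw [h]; exact List.mem_cons_self
    · exact List.mem_cons_of_mem _ h
  have hmmem : t.foldl min a ∈ a :: t := by
    rcases PySem.List.foldl_min_mem t a with h | h
    · rw [h]; exact List.mem_cons_self
    · exact List.mem_cons_of_mem _ h
  unfold find_sum_between_max_min
  rw [if_neg (by simp)]
  rw [PySem.List.max?_id_cons, PySem.List.min?_id_cons]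
  simp only [PySem.List.index?_eq_idxOf?, idxOf?_eq_some_of_mem _ _ hMmem,
    idxOf?_eq_some_of_mem _ _ hmmem]
  rw [PySem.List.slice_natCast, PySem.List.foldl_ite_eq_foldl_filter, ← List.sum_eq_foldl]

-- idxOf over the cons, max side
theorem hIM (a : Int) (t : List Int) :
    (if a < t.foldl max a then 1 + List.idxOf (t.foldl max a) t else 0) =
      List.idxOf (t.foldl max a) (a :: t) := by
  by_cases h : a < t.foldl max a
  · have hne : (a == t.foldl max a) = false := by simp; omega
    rw [if_pos h, List.idxOf_cons, hne]
    simp [Nat.add_comm]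
  · have he : t.foldl max a = a := le_antisymm (le_of_not_gt h) (PySem.List.le_foldl_max t a).1
    rw [if_neg h, he, List.idxOf_cons]
    simp

theorem hIm (a : Int) (t : List Int) :
    (if t.foldl min a < a then 1 + List.idxOf (t.foldl min a) t else 0) =
      List.idxOf (t.foldl min a) (a :: t) := by
  by_cases h : t.foldl min a < a
  · have hne : (a == t.foldl min a) = false := by simp; omega
    rw [if_pos h, List.idxOf_cons, hne]
    simp [Nat.add_comm]
  · have he : t.foldl min a = a := le_antisymm (PySem.List.foldl_min_le t a).1 (le_of_not_gt h)
    rw [if_neg h, he, List.idxOf_cons]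
    simp

-- the snapshot stored for an extremum at index e is the negative prefix-sum up to e (+ d)
theorem snap_char_max (a : Int) (t : List Int) (d : Nat) (E : Int)
    (hE : E = N ((a :: t).take d)) :
    (if a < t.foldl max a then 0 + negp a + N (t.take (List.idxOf (t.foldl max a) t + d)) else E) =
      N ((a :: t).take (List.idxOf (t.foldl max a) (a :: t) + d)) := by
  by_cases h : a < t.foldl max a
  · have hne : (a == t.foldl max a) = false := by simp; omega
    rw [if_pos h, List.idxOf_cons, hne]
    simp only [cond_false]
    rw [show List.idxOf (t.foldl max a) t + 1 + d = (List.idxOf (t.foldl max a) t + d) + 1 by omega,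
      List.take_succ_cons, N_cons]
    ring
  · have he : t.foldl max a = a := le_antisymm (le_of_not_gt h) (PySem.List.le_foldl_max t a).1
    rw [if_neg h, he, List.idxOf_cons]
    simp [hE]

theorem snap_char_min (a : Int) (t : List Int) (d : Nat) (E : Int)
    (hE : E = N ((a :: t).take d)) :
    (if t.foldl min a < a then 0 + negp a + N (t.take (List.idxOf (t.foldl min a) t + d)) else E) =
      N ((a :: t).take (List.idxOf (t.foldl min a) (a :: t) + d)) := by
  by_cases h : t.foldl min a < a
  · have hne : (a == t.foldl min a) = false := by simp; omega
    rw [if_pos h, List.idxOf_cons, hne]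
    simp only [cond_false]
    rw [show List.idxOf (t.foldl min a) t + 1 + d = (List.idxOf (t.foldl min a) t + d) + 1 by omega,
      List.take_succ_cons, N_cons]
    ring
  · have he : t.foldl min a = a := le_antisymm (PySem.List.foldl_min_le t a).1 (le_of_not_gt h)
    rw [if_neg h, he, List.idxOf_cons]
    simp [hE]

-- B on a nonempty list: a difference of negative prefix-sums chosen by the index order
theorem B_char (a : Int) (t : List Int) :
    find_sum_between_max_min_alt (a :: t) =
      (if List.idxOf (t.foldl max a) (a :: t) < List.idxOf (t.foldl min a) (a :: t) then
        N ((a :: t).take (List.idxOf (t.foldl min a) (a :: t))) -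
          N ((a :: t).take (List.idxOf (t.foldl max a) (a :: t) + 1))
      else if List.idxOf (t.foldl min a) (a :: t) < List.idxOf (t.foldl max a) (a :: t) then
        N ((a :: t).take (List.idxOf (t.foldl max a) (a :: t))) -
          N ((a :: t).take (List.idxOf (t.foldl min a) (a :: t) + 1))
      else 0) := by
  have hIM' : (if a < t.foldl max a then 0 + 1 + List.idxOf (t.foldl max a) t else 0) =
      List.idxOf (t.foldl max a) (a :: t) := by simpa using hIM a t
  have hIm' : (if t.foldl min a < a then 0 + 1 + List.idxOf (t.foldl min a) t else 0) =
      List.idxOf (t.foldl min a) (a :: t) := by simpa using hIm a t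
  have hpA : (if a < t.foldl max a then 0 + negp a + N (t.take (List.idxOf (t.foldl max a) t + 0)) else 0) =
      N ((a :: t).take (List.idxOf (t.foldl max a) (a :: t))) := by
    simpa using snap_char_max a t 0 0 (by simp [N])
  have hpB : (if a < t.foldl max a then 0 + negp a + N (t.take (List.idxOf (t.foldl max a) t + 1)) else 0 + negp a) =
      N ((a :: t).take (List.idxOf (t.foldl max a) (a :: t) + 1)) := by
    exact snap_char_max a t 1 (0 + negp a) (by by_cases h : a < 0 <;> simp [N, negp, h])
  have hqA : (if t.foldl min a < a then 0 + negp a + N (t.take (List.idxOf (t.foldl min a) t + 0)) else 0) =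
      N ((a :: t).take (List.idxOf (t.foldl min a) (a :: t))) := by
    simpa using snap_char_min a t 0 0 (by simp [N])
  have hqB : (if t.foldl min a < a then 0 + negp a + N (t.take (List.idxOf (t.foldl min a) t + 1)) else 0 + negp a) =
      N ((a :: t).take (List.idxOf (t.foldl min a) (a :: t) + 1)) := by
    exact snap_char_min a t 1 (0 + negp a) (by by_cases h : a < 0 <;> simp [N, negp, h])
  unfold find_sum_between_max_min_alt
  rw [List.foldl_cons,
    show altStep (none, none, 0, 0) a =
      (some (a, 0, 0, 0 + negp a), some (a, 0, 0, 0 + negp a), 0 + negp a, 0 + 1) from rfl,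
    foldl_altStep]
  dsimp only
  rw [hIM', hIm', hpA, hpB, hqA, hqB]

-- window difference of prefix-sums
theorem N_window (l : List Int) (lo hi : Nat) (h : lo < hi) :
    N (l.take hi) - N (l.take (lo + 1)) = N ((l.drop (lo + 1)).take (hi - (lo + 1))) := by
  obtain ⟨c, hc⟩ : ∃ c, hi = (lo + 1) + c := ⟨hi - (lo + 1), by omega⟩
  subst hc
  rw [List.take_add, N_append, Nat.add_sub_cancel_left]
  ring

-- ===== VERDICT (by name: the statement is the Claim_ definition above) =====
theorem find_sum_between_max_min_spec : Claim_equal_find_sum_between_max_min := by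
  intro arr _
  unfold Spec_find_sum_between_max_min
  cases arr with
  | nil => rfl
  | cons a t =>
    rw [A_char, B_char]
    rcases Nat.lt_trichotomy (List.idxOf (t.foldl max a) (a :: t)) (List.idxOf (t.foldl min a) (a :: t)) with h | h | h
    · rw [if_pos h,
        show min (List.idxOf (t.foldl max a) (a :: t)) (List.idxOf (t.foldl min a) (a :: t)) = List.idxOf (t.foldl max a) (a :: t) by omega,
        show max (List.idxOf (t.foldl max a) (a :: t)) (List.idxOf (t.foldl min a) (a :: t)) = List.idxOf (t.foldl min a) (a :: t) by omega,
        ← N_window _ _ _ h]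
    · rw [if_neg (by omega), if_neg (by omega), ← h,
        show min (List.idxOf (t.foldl max a) (a :: t)) (List.idxOf (t.foldl max a) (a :: t)) = List.idxOf (t.foldl max a) (a :: t) by omega,
        show max (List.idxOf (t.foldl max a) (a :: t)) (List.idxOf (t.foldl max a) (a :: t)) = List.idxOf (t.foldl max a) (a :: t) by omega,
        Nat.sub_eq_zero_of_le (by omega), List.take_zero]
      simp [N]
    · rw [if_neg (by omega), if_pos h,
        show min (List.idxOf (t.foldl max a) (a :: t)) (List.idxOf (t.foldl min a) (a :: t)) = List.idxOf (t.foldl min a) (a :: t) by omega,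
        show max (List.idxOf (t.foldl max a) (a :: t)) (List.idxOf (t.foldl min a) (a :: t)) = List.idxOf (t.foldl max a) (a :: t) by omega,
        ← N_window _ _ _ h]
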